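-- pv_equiv track=rewrite | github.com/mchang21/Advent_Of_Code | 2022/Day_14/14.py | simulate_sand_fall
-- ===== SOURCE A (Python) =====
-- def simulate_sand_fall(rocks, part_2=False):
--     # find abyss level
--     max_y = float('-inf')
--     for (_,y) in rocks: max_y = max(max_y, y if not part_2 else y+2)
--     sand = 0
--     # simulate until cannot add more sand
--     while True:
--         # initial sand position
--         x,y = 500, 0
--         # simulate sand falling
--         while True:
--             if part_2:
--                 if (x,y) in rocks:
--                     return sand
--             # reached abyss
--             if y >= max_y:
--                 rocks.add((x,y))
--                 if part_2:
--                     break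
--                 return sand
--             # check down
--             if (x,y+1) not in rocks:
--                 y +=1
--             # check down-left
--             elif (x-1,y+1) not in rocks:
--                 x -= 1; y += 1
--             # check down-right
--             elif (x+1,y+1) not in rocks:
--                 x += 1; y += 1
--             # stopped falling
--             else:
--                 rocks.add((x,y))
--                 sand += 1
--                 break
-- ===== SOURCE B (Python) =====
-- def simulate_sand_fall(rocks, part_2=False):
--     # Path-stack sand simulation: each new grain resumes from the previous
--     # grain's penultimate cell instead of re-falling from the source.
--     # Return value only: unlike A, the caller's set is not mutated (B works on a copy).
--     occupied = set(rocks)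
--     max_y = None
--     for (_, y) in occupied:
--         yy = y + 2 if part_2 else y
--         if max_y is None or yy > max_y:
--             max_y = yy
--     sand = 0
--     path = [(500, 0)]
--     while path:
--         x, y = path[-1]
--         if part_2 and (x, y) in occupied:
--             return sand
--         # glide down from (x, y), remembering the cells passed through
--         while max_y is not None and y < max_y:
--             if (x, y + 1) not in occupied:
--                 y += 1
--             elif (x - 1, y + 1) not in occupied:
--                 x -= 1; y += 1
--             elif (x + 1, y + 1) not in occupied:
--                 x += 1; y += 1
--             else:
--                 break
--             path.append((x, y))
--         occupied.add((x, y))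
--         path.pop()
--         if max_y is None or y >= max_y:
--             # reached the abyss (part 1) / the floor (part 2)
--             if not part_2:
--                 return sand
--         else:
--             sand += 1
--     return sand
-- ===== Notes on version B (the rewrite author's own statement) =====
-- stated objective: alternative
-- what changed: B keeps the falling grain's path on an explicit stack and starts each new grain from the previous grain's penultimate cell instead of re-dropping every grain from (500,0); Pre_ excludes only the part-1 inputs where the source is sealed off from the abyss, on which Python A loops forever and returns nothing.
import Mathlib
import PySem

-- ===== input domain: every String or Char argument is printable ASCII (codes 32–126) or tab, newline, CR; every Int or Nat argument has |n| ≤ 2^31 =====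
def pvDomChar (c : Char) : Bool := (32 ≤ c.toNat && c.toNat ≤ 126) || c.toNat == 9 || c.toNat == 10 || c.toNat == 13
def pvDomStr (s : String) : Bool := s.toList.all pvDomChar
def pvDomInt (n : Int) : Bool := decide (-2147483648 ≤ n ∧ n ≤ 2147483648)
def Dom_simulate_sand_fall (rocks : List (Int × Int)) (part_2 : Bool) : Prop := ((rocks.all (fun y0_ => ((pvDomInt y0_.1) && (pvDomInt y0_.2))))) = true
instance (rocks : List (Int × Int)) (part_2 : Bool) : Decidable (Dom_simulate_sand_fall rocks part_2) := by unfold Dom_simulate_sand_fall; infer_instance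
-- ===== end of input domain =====

-- B resumes each grain from the previous grain's path (an explicit stack) instead of
-- re-dropping every grain from the source; return value only: A mutates the caller's
-- set (adds every settled grain), B works on a copy and does not.

-- ===== PORT A =====

inductive PvFallRes where
  | ret : PvFallRes
  | abyss : Int → Int → PvFallRes
  | settle : Int → Int → PvFallRes
deriving DecidableEq, Repr

-- 'y >= max_y' where none is float('-inf')
def pvGeY (m : Option Int) (y : Int) : Bool :=
  match m with
  | none => true
  | some m0 => decide (m0 ≤ y)

-- A's max_y loop: max_y = max(max_y, y if not part_2 else y+2), starting from -inf
def pvMaxYA (occ : List (Int × Int)) (part_2 : Bool) : Option Int :=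
  occ.foldl (fun mv p =>
    let v : Int := if part_2 then p.2 + 2 else p.2
    match mv with
    | none => some v
    | some m0 => some (max m0 v)) none

-- A's inner falling loop (terminates because y strictly increases towards max_y)
def pvFallA (part_2 : Bool) (m : Option Int) (occ : Std.HashSet (Int × Int)) (x y : Int) : PvFallRes :=
  if part_2 = true ∧ (x, y) ∈ occ then .ret
  else if hy : pvGeY m y = true then .abyss x y
  else if (x, y + 1) ∉ occ then pvFallA part_2 m occ x (y + 1)
  else if (x - 1, y + 1) ∉ occ then pvFallA part_2 m occ (x - 1) (y + 1)
  else if (x + 1, y + 1) ∉ occ then pvFallA part_2 m occ (x + 1) (y + 1)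
  else .settle x y
termination_by (match m with | none => 0 | some m0 => (m0 - y).toNat)
decreasing_by
  all_goals cases m with
  | none => simp [pvGeY] at hy
  | some m0 => simp [pvGeY] at hy; simp only []; omega

-- totality guard for the outer 'while True' (identical in both ports): in any
-- terminating run every grain but the last occupies a fresh cell of the triangle
-- 0 ≤ y ≤ max_y, |x - 500| ≤ y, so this fuel is never exhausted on such a run
def pvFuel (m : Option Int) : Nat :=
  match m with
  | none => 4
  | some m0 => ((m0 + 2) * (2 * m0 + 3) + 4).toNat

-- A's outer loop: one fuel tick per grain
def pvLoopA (part_2 : Bool) (m : Option Int) : Nat → Std.HashSet (Int × Int) → Int → Int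
  | 0, _, sand => sand
  | f + 1, occ, sand =>
    match pvFallA part_2 m occ 500 0 with
    | .ret => sand
    | .abyss x y =>
        if part_2 then pvLoopA part_2 m f (occ.insert (x, y)) sand else sand
    | .settle x y => pvLoopA part_2 m f (occ.insert (x, y)) (sand + 1)

def simulate_sand_fall (rocks : List (Int × Int)) (part_2 : Bool) : Int :=
  let occ := Std.HashSet.ofList rocks
  let m := pvMaxYA rocks part_2
  pvLoopA part_2 m (pvFuel m) occ 0

-- ===== PORT B =====

-- B's max_y loop ('if max_y is None or yy > max_y: max_y = yy')
def pvMaxYB (occ : List (Int × Int)) (part_2 : Bool) : Option Int :=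
  occ.foldl (fun mv p =>
    let v : Int := if part_2 then p.2 + 2 else p.2
    match mv with
    | none => some v
    | some m0 => if m0 < v then some v else some m0) none

-- B's inner glide loop: descend from (x,y), pushing every cell passed through
def pvGlideB (m : Option Int) (occ : Std.HashSet (Int × Int)) (x y : Int) (path : List (Int × Int)) :
    (Int × Int) × List (Int × Int) :=
  if hy : pvGeY m y = true then ((x, y), path)
  else if (x, y + 1) ∉ occ then pvGlideB m occ x (y + 1) ((x, y + 1) :: path)
  else if (x - 1, y + 1) ∉ occ then pvGlideB m occ (x - 1) (y + 1) ((x - 1, y + 1) :: path)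
  else if (x + 1, y + 1) ∉ occ then pvGlideB m occ (x + 1) (y + 1) ((x + 1, y + 1) :: path)
  else ((x, y), path)
termination_by (match m with | none => 0 | some m0 => (m0 - y).toNat)
decreasing_by
  all_goals cases m with
  | none => simp [pvGeY] at hy
  | some m0 => simp [pvGeY] at hy; simp only []; omega

-- B's outer loop over the stack; one fuel tick per settled/escaped grain
def pvLoopB (part_2 : Bool) (m : Option Int) : Nat → Std.HashSet (Int × Int) → Int → List (Int × Int) → Int
  | _, _, sand, [] => sand
  | 0, _, sand, _ :: _ => sand
  | f + 1, occ, sand, (x, y) :: rest =>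
    if part_2 = true ∧ (x, y) ∈ occ then sand
    else
      let g := pvGlideB m occ x y ((x, y) :: rest)
      let occ' := occ.insert g.1
      let path' := g.2.tail
      if pvGeY m g.1.2 then
        if part_2 then pvLoopB part_2 m f occ' sand path' else sand
      else pvLoopB part_2 m f occ' (sand + 1) path'

def simulate_sand_fall_alt (rocks : List (Int × Int)) (part_2 : Bool) : Int :=
  let occ := Std.HashSet.ofList rocks
  let m := pvMaxYB rocks part_2
  pvLoopB part_2 m (pvFuel m) occ 0 [(500, 0)]

-- ===== PRECONDITION & SPEC =====

-- cut one blocked x out of an interval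
def pvCut1 (z : Int) (iv : Int × Int) : List (Int × Int) :=
  if z < iv.1 ∨ iv.2 < z then [iv]
  else (if iv.1 ≤ z - 1 then [(iv.1, z - 1)] else []) ++ (if z + 1 ≤ iv.2 then [(z + 1, iv.2)] else [])

-- remove every rock of row r from the intervals
def pvCutRow (occ : List (Int × Int)) (r : Int) (ivs : List (Int × Int)) : List (Int × Int) :=
  occ.foldl (fun acc p => if p.2 = r then acc.flatMap (pvCut1 p.1) else acc) ivs

-- widen by the rock-free gap, then cut the rock row
def pvStepRow (occ : List (Int × Int)) (st : Int × List (Int × Int)) (r : Int) : Int × List (Int × Int) :=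
  (r, pvCutRow occ r (st.2.map (fun iv => (iv.1 - (r - st.1), iv.2 + (r - st.1)))))

-- the rows 1..max_y that contain rocks, strictly ascending
def pvRockRows (occ : List (Int × Int)) : List Int :=
  PySem.List.sorted ((PySem.Set.ofList (occ.map Prod.snd)).filter (fun t => decide (0 < t))) (fun t => t) false

-- can sand from (500,0) reach the abyss row? (interval flood fill over rock rows)
def pvEscapeCheck (occ : List (Int × Int)) (m : Option Int) : Bool :=
  match m with
  | none => true
  | some _ => !((pvRockRows occ).foldl (pvStepRow occ) (0, [(500, 500)])).2.isEmpty

-- Pre_ excludes exactly the inputs on which Python A loops forever and returns nothing: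
-- part 1 with the source sealed off from the abyss (sand keeps piling at (500,0)).
def Pre_simulate_sand_fall (rocks : List (Int × Int)) (part_2 : Bool) : Prop :=
  part_2 = true ∨ pvEscapeCheck rocks (pvMaxYA rocks false) = true

instance (rocks : List (Int × Int)) (part_2 : Bool) : Decidable (Pre_simulate_sand_fall rocks part_2) := by
  unfold Pre_simulate_sand_fall; infer_instance

def pvWitness_simulate_sand_fall : (List (Int × Int)) × Bool := ([(499, 2), (500, 2), (501, 2)], false)

def Spec_simulate_sand_fall (rocks : List (Int × Int)) (part_2 : Bool) (out : Int) : Prop := out = simulate_sand_fall_alt rocks part_2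
instance (rocks : List (Int × Int)) (part_2 : Bool) (out : Int) : Decidable (Spec_simulate_sand_fall rocks part_2 out) := by unfold Spec_simulate_sand_fall; infer_instance

-- ===== CLAIM (what is proved, stated in full; the proofs are below) =====
def Claim_equal_simulate_sand_fall : Prop := ∀ (rocks : List (Int × Int)) (part_2 : Bool), Dom_simulate_sand_fall rocks part_2 → Pre_simulate_sand_fall rocks part_2 → Spec_simulate_sand_fall rocks part_2 (simulate_sand_fall rocks part_2)

-- ===== LEMMAS AND PROOFS =====

-- the move rule shared by both programs, as a function (proof helper)
def pvChoose (m : Option Int) (occ : Std.HashSet (Int × Int)) (p : Int × Int) : Option (Int × Int) :=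
  if pvGeY m p.2 = true then none
  else if (p.1, p.2 + 1) ∉ occ then some (p.1, p.2 + 1)
  else if (p.1 - 1, p.2 + 1) ∉ occ then some (p.1 - 1, p.2 + 1)
  else if (p.1 + 1, p.2 + 1) ∉ occ then some (p.1 + 1, p.2 + 1)
  else none

-- the stack is a fall trajectory from the source (top-first)
def PvChain (m : Option Int) (occ : Std.HashSet (Int × Int)) : List (Int × Int) → Prop
  | [] => True
  | [p] => p = (500, 0)
  | c :: p :: rest => pvChoose m occ p = some c ∧ PvChain m occ (p :: rest)

-- abyss reachability as a path predicate (proof-side mirror of pvFrontier)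
def pvEscapes (m : Option Int) (occ : Std.HashSet (Int × Int)) (x y : Int) : Bool :=
  if hy : pvGeY m y = true then true
  else (decide ((x, y + 1) ∉ occ) && pvEscapes m occ x (y + 1))
    || (decide ((x - 1, y + 1) ∉ occ) && pvEscapes m occ (x - 1) (y + 1))
    || (decide ((x + 1, y + 1) ∉ occ) && pvEscapes m occ (x + 1) (y + 1))
termination_by (match m with | none => 0 | some m0 => (m0 - y).toNat)
decreasing_by
  all_goals cases m with
  | none => simp [pvGeY] at hy
  | some m0 => simp [pvGeY] at hy; simp only []; omega

theorem pv_maxY_eq (occ : List (Int × Int)) (part_2 : Bool) : pvMaxYA occ part_2 = pvMaxYB occ part_2 := by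
  unfold pvMaxYA pvMaxYB
  congr 1
  funext mv p
  cases mv with
  | none => rfl
  | some m0 =>
    simp only [max_def]
    split_ifs <;> first | rfl | (simp only [Option.some.injEq]; omega)

theorem pv_mem_add_ne {occ : Std.HashSet (Int × Int)} {s q : Int × Int} (h : q ≠ s) :
    q ∈ occ.insert s ↔ q ∈ occ := by
  rw [Std.HashSet.mem_insert, beq_iff_eq]
  exact or_iff_right (fun he => h he.symm)

theorem pv_choose_y {m : Option Int} {occ : Std.HashSet (Int × Int)} {p c : Int × Int}
    (h : pvChoose m occ p = some c) : c.2 = p.2 + 1 := by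
  unfold pvChoose at h
  split_ifs at h <;> first | exact Option.noConfusion h | (injection h with h; subst h; rfl)

theorem pv_chain_lt (m : Option Int) (occ : Std.HashSet (Int × Int)) :
    ∀ (rest : List (Int × Int)) (c : Int × Int), PvChain m occ (c :: rest) →
      ∀ q ∈ rest, q.2 < c.2 := by
  intro rest
  induction rest with
  | nil => intro c _ q hq; cases hq
  | cons p rest' ih =>
    intro c hch q hq
    obtain ⟨hcp, hch'⟩ := hch
    have hy : c.2 = p.2 + 1 := pv_choose_y hcp
    rcases List.mem_cons.1 hq with rfl | hq
    · omega
    · have := ih p hch' q hq; omega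

theorem pv_choose_add {m : Option Int} {occ : Std.HashSet (Int × Int)} {s : Int × Int} (p : Int × Int)
    (h : p.2 + 1 < s.2) : pvChoose m (occ.insert s) p = pvChoose m occ p := by
  have h1 : ((p.1, p.2 + 1) : Int × Int) ≠ s := by intro he; rw [← he] at h; simp at h
  have h2 : ((p.1 - 1, p.2 + 1) : Int × Int) ≠ s := by intro he; rw [← he] at h; simp at h
  have h3 : ((p.1 + 1, p.2 + 1) : Int × Int) ≠ s := by intro he; rw [← he] at h; simp at h
  unfold pvChoose
  simp only [pv_mem_add_ne h1, pv_mem_add_ne h2, pv_mem_add_ne h3]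

theorem pv_chain_add (m : Option Int) (occ : Std.HashSet (Int × Int)) (s : Int × Int) :
    ∀ (rest : List (Int × Int)) (c : Int × Int), PvChain m occ (c :: rest) → c.2 < s.2 →
      PvChain m (occ.insert s) (c :: rest) := by
  intro rest
  induction rest with
  | nil => intro c hch _; exact hch
  | cons p rest' ih =>
    intro c hch hlt
    obtain ⟨hcp, hch'⟩ := hch
    have hy : c.2 = p.2 + 1 := pv_choose_y hcp
    exact ⟨by rw [pv_choose_add p (by omega)]; exact hcp, ih p hch' (by omega)⟩

-- one step of A's falling loop through the move rule
theorem pv_fallA_step (part_2 : Bool) (m : Option Int) (occ : Std.HashSet (Int × Int)) (x y : Int)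
    (hm : ¬(part_2 = true ∧ (x, y) ∈ occ)) :
    pvFallA part_2 m occ x y =
      match pvChoose m occ (x, y) with
      | some c => pvFallA part_2 m occ c.1 c.2
      | none => if pvGeY m y then .abyss x y else .settle x y := by
  rw [pvFallA]
  rw [if_neg hm]
  unfold pvChoose
  split_ifs <;> rfl

-- A's grain, dropped from the source, rejoins the stored path at its top
theorem pv_walk (part_2 : Bool) (m : Option Int) (occ : Std.HashSet (Int × Int)) :
    ∀ (rest : List (Int × Int)) (c : Int × Int), PvChain m occ (c :: rest) →
      (part_2 = true → ∀ q ∈ rest, q ∉ occ) →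
      pvFallA part_2 m occ 500 0 = pvFallA part_2 m occ c.1 c.2 := by
  intro rest
  induction rest with
  | nil => intro c hch _; rw [hch]
  | cons p rest' ih =>
    intro c hch hfree
    obtain ⟨hcp, hch'⟩ := hch
    have hstep := pv_fallA_step part_2 m occ p.1 p.2 (by
      rintro ⟨h2, hmem⟩
      exact (hfree h2 p List.mem_cons_self) hmem)
    rw [ih p hch' (fun h2 q hq => hfree h2 q (List.mem_cons_of_mem _ hq)), hstep, hcp]

-- ===== glide lemmas (functional induction over pvGlideB) =====

theorem pv_glide_head (m : Option Int) (occ : Std.HashSet (Int × Int)) :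
    ∀ (x y : Int) (path : List (Int × Int)), path.head? = some (x, y) →
      (pvGlideB m occ x y path).2 = (pvGlideB m occ x y path).1 :: (pvGlideB m occ x y path).2.tail := by
  intro x y path
  fun_induction pvGlideB m occ x y path
  case case1 x y path hy => intro hh; cases path <;> simp_all
  case case5 x y path hy h1 h2 h3 => intro hh; cases path <;> simp_all
  case case2 x y path hy h1 ih => intro _; exact ih (by simp)
  case case3 x y path hy h1 h2 ih => intro _; exact ih (by simp)
  case case4 x y path hy h1 h2 h3 ih => intro _; exact ih (by simp)
theorem pv_glide_chain (m : Option Int) (occ : Std.HashSet (Int × Int)) :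
    ∀ (x y : Int) (path : List (Int × Int)), path.head? = some (x, y) → PvChain m occ path →
      PvChain m occ (pvGlideB m occ x y path).2 := by
  intro x y path
  fun_induction pvGlideB m occ x y path
  case case1 => intro _ hch; exact hch
  case case5 => intro _ hch; exact hch
  case case2 x y path hy h1 ih =>
    intro hh hch
    cases path with
    | nil => simp at hh
    | cons p rest =>
      injection hh with hh; subst hh
      refine ih (by simp) ⟨?_, hch⟩
      unfold pvChoose
      rw [if_neg (by simpa using hy), if_pos h1]
  case case3 x y path hy h1 h2 ih =>
    intro hh hch
    cases path with
    | nil => simp at hh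
    | cons p rest =>
      injection hh with hh; subst hh
      refine ih (by simp) ⟨?_, hch⟩
      unfold pvChoose
      rw [if_neg (by simpa using hy), if_neg (by simpa using h1), if_pos h2]
  case case4 x y path hy h1 h2 h3 ih =>
    intro hh hch
    cases path with
    | nil => simp at hh
    | cons p rest =>
      injection hh with hh; subst hh
      refine ih (by simp) ⟨?_, hch⟩
      unfold pvChoose
      rw [if_neg (by simpa using hy), if_neg (by simpa using h1), if_neg (by simpa using h2), if_pos h3]
theorem pv_glide_free (m : Option Int) (occ : Std.HashSet (Int × Int)) :
    ∀ (x y : Int) (path : List (Int × Int)), (∀ q ∈ path, q ∉ occ) →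
      ∀ q ∈ (pvGlideB m occ x y path).2, q ∉ occ := by
  intro x y path
  fun_induction pvGlideB m occ x y path
  case case1 => intro hf; exact hf
  case case5 => intro hf; exact hf
  case case2 x y path hy h1 ih =>
    intro hf
    refine ih ?_
    intro q hq
    rcases List.mem_cons.1 hq with rfl | hq
    · exact h1
    · exact hf q hq
  case case3 x y path hy h1 h2 ih =>
    intro hf
    refine ih ?_
    intro q hq
    rcases List.mem_cons.1 hq with rfl | hq
    · exact h2
    · exact hf q hq
  case case4 x y path hy h1 h2 h3 ih =>
    intro hf
    refine ih ?_
    intro q hq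
    rcases List.mem_cons.1 hq with rfl | hq
    · exact h3
    · exact hf q hq
theorem pv_glide_blocked (m : Option Int) (occ : Std.HashSet (Int × Int)) :
    ∀ (x y : Int) (path : List (Int × Int)),
      pvGeY m (pvGlideB m occ x y path).1.2 = false →
      ((pvGlideB m occ x y path).1.1, (pvGlideB m occ x y path).1.2 + 1) ∈ occ ∧
      ((pvGlideB m occ x y path).1.1 - 1, (pvGlideB m occ x y path).1.2 + 1) ∈ occ ∧
      ((pvGlideB m occ x y path).1.1 + 1, (pvGlideB m occ x y path).1.2 + 1) ∈ occ := by
  intro x y path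
  fun_induction pvGlideB m occ x y path
  case case1 x y path hy => intro hge; rw [hy] at hge; cases hge
  case case5 x y path hy h1 h2 h3 =>
    intro _
    exact ⟨by simpa using h1, by simpa using h2, by simpa using h3⟩
  case case2 x y path hy h1 ih => exact ih
  case case3 x y path hy h1 h2 ih => exact ih
  case case4 x y path hy h1 h2 h3 ih => exact ih
theorem pv_glide_fall (part_2 : Bool) (m : Option Int) (occ : Std.HashSet (Int × Int)) :
    ∀ (x y : Int) (path : List (Int × Int)), (part_2 = true → (x, y) ∉ occ) →
      pvFallA part_2 m occ x y =
        (if pvGeY m (pvGlideB m occ x y path).1.2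
         then PvFallRes.abyss (pvGlideB m occ x y path).1.1 (pvGlideB m occ x y path).1.2
         else PvFallRes.settle (pvGlideB m occ x y path).1.1 (pvGlideB m occ x y path).1.2) := by
  intro x y path
  fun_induction pvGlideB m occ x y path
  case case1 x y path hy =>
    intro hfresh
    rw [pvFallA, if_neg (by rintro ⟨h2, hm⟩; exact hfresh h2 hm), dif_pos hy]
    simp [hy]
  case case5 x y path hy h1 h2 h3 =>
    intro hfresh
    rw [pvFallA, if_neg (by rintro ⟨h2, hm⟩; exact hfresh h2 hm), dif_neg hy,
        if_neg h1, if_neg h2, if_neg h3]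
    simp [Bool.not_eq_true] at hy
    simp [hy]
  case case2 x y path hy h1 ih =>
    intro hfresh
    rw [pvFallA, if_neg (by rintro ⟨h2, hm⟩; exact hfresh h2 hm), dif_neg hy, if_pos h1]
    exact ih (fun _ => h1)
  case case3 x y path hy h1 h2 ih =>
    intro hfresh
    rw [pvFallA, if_neg (by rintro ⟨h2, hm⟩; exact hfresh h2 hm), dif_neg hy, if_neg h1, if_pos h2]
    exact ih (fun _ => h2)
  case case4 x y path hy h1 h2 h3 ih =>
    intro hfresh
    rw [pvFallA, if_neg (by rintro ⟨h2, hm⟩; exact hfresh h2 hm), dif_neg hy, if_neg h1, if_neg h2, if_pos h3]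
    exact ih (fun _ => h3)

-- ===== escape lemmas =====

theorem pv_escapes_blocked (m : Option Int) (occ : Std.HashSet (Int × Int)) (x y : Int)
    (hy : pvGeY m y = false) (h1 : (x, y + 1) ∈ occ) (h2 : (x - 1, y + 1) ∈ occ)
    (h3 : (x + 1, y + 1) ∈ occ) : pvEscapes m occ x y = false := by
  rw [pvEscapes]
  simp [hy, h1, h2, h3]
theorem pv_escapes_add (m : Option Int) (occ : Std.HashSet (Int × Int)) (s : Int × Int)
    (hys : pvGeY m s.2 = false) (hs1 : (s.1, s.2 + 1) ∈ occ) (hs2 : (s.1 - 1, s.2 + 1) ∈ occ)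
    (hs3 : (s.1 + 1, s.2 + 1) ∈ occ) :
    ∀ (x y : Int), pvEscapes m occ x y = true → pvEscapes m (occ.insert s) x y = true := by
  cases m with
  | none =>
    intro x y _
    rw [pvEscapes]
    simp [pvGeY]
  | some m0 =>
    have key : ∀ (k : Nat) (x y : Int), (m0 - y).toNat ≤ k →
        pvEscapes (some m0) occ x y = true → pvEscapes (some m0) (occ.insert s) x y = true := by
      intro k
      induction k with
      | zero =>
        intro x y hk h
        have hy : pvGeY (some m0) y = true := by simp [pvGeY]; omega
        rw [pvEscapes, dif_pos hy]
      | succ k ih =>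
        intro x y hk h
        by_cases hy : pvGeY (some m0) y = true
        · rw [pvEscapes, dif_pos hy]
        · rw [pvEscapes, dif_neg hy] at h
          rw [pvEscapes, dif_neg hy]
          simp only [Bool.or_eq_true, Bool.and_eq_true, decide_eq_true_eq] at h ⊢
          have hyk : (m0 - (y + 1)).toNat ≤ k := by
            simp [pvGeY] at hy; omega
          have fresh : ∀ (c : Int × Int), pvEscapes (some m0) occ c.1 c.2 = true → c ≠ s := by
            intro c hesc hcs
            subst hcs
            rw [pv_escapes_blocked _ occ c.1 c.2 hys hs1 hs2 hs3] at hesc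
            cases hesc
          rcases h with (⟨hn, he⟩ | ⟨hn, he⟩) | ⟨hn, he⟩
          · refine Or.inl (Or.inl ⟨?_, ih _ _ hyk he⟩)
            intro hmem
            rcases Std.HashSet.mem_insert.1 hmem with hc | hc
            · exact fresh _ he (beq_iff_eq.1 hc).symm
            · exact hn hc
          · refine Or.inl (Or.inr ⟨?_, ih _ _ hyk he⟩)
            intro hmem
            rcases Std.HashSet.mem_insert.1 hmem with hc | hc
            · exact fresh _ he (beq_iff_eq.1 hc).symm
            · exact hn hc
          · refine Or.inr ⟨?_, ih _ _ hyk he⟩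
            intro hmem
            rcases Std.HashSet.mem_insert.1 hmem with hc | hc
            · exact fresh _ he (beq_iff_eq.1 hc).symm
            · exact hn hc
    intro x y
    exact key (m0 - y).toNat x y (le_refl _)
-- ===== the interval reachability check is sound for pvEscapes =====

inductive PvReach (occ : Std.HashSet (Int × Int)) : Int → Int → Prop where
  | src : PvReach occ 500 0
  | step : ∀ {x y x' : Int}, PvReach occ x y → (x' = x - 1 ∨ x' = x ∨ x' = x + 1) →
      (x', y + 1) ∉ occ → PvReach occ x' (y + 1)

theorem pv_escapes_up (m : Option Int) (occ : Std.HashSet (Int × Int)) :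
    ∀ (x y : Int), PvReach occ x y → pvEscapes m occ x y = true → pvEscapes m occ 500 0 = true := by
  intro x y h
  induction h with
  | src => exact id
  | @step x y x' _ hrel hfree ih =>
    intro he
    apply ih
    by_cases hy : pvGeY m y = true
    · rw [pvEscapes, dif_pos hy]
    · rw [pvEscapes, dif_neg hy]
      simp only [Bool.or_eq_true, Bool.and_eq_true, decide_eq_true_eq]
      rcases hrel with rfl | rfl | rfl
      · exact Or.inl (Or.inr ⟨hfree, he⟩)
      · exact Or.inl (Or.inl ⟨hfree, he⟩)
      · exact Or.inr ⟨hfree, he⟩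

theorem pv_reach_expand (occ : Std.HashSet (Int × Int)) :
    ∀ (d : Nat) (x y x' : Int), PvReach occ x y →
      (∀ t : Int, y < t → t ≤ y + (d : Int) → ∀ p ∈ occ, p.2 ≠ t) →
      x - (d : Int) ≤ x' → x' ≤ x + (d : Int) → PvReach occ x' (y + (d : Int)) := by
  intro d
  induction d with
  | zero =>
    intro x y x' hr _ h1 h2
    have hx : x' = x := by push_cast at h1 h2; omega
    subst hx
    simpa using hr
  | succ d ih =>
    intro x y x' hr hfree h1 h2
    have hfree1 : ∀ x1 : Int, (x1, y + 1) ∉ occ := by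
      intro x1 hmem
      exact hfree (y + 1) (by omega) (by push_cast; omega) (x1, y + 1) hmem rfl
    set x1 : Int := if x < x' then x + 1 else if x' < x then x - 1 else x with hx1
    have hr1 : PvReach occ x1 (y + 1) := by
      refine PvReach.step hr ?_ (hfree1 x1)
      rw [hx1]; split_ifs <;> tauto
    have hres := ih x1 (y + 1) x' hr1
      (by intro t ht1 ht2 p hp; exact hfree t (by omega) (by push_cast at ht2 ⊢; omega) p hp)
      (by rw [hx1]; push_cast at h1 h2 ⊢; split_ifs <;> omega)
      (by rw [hx1]; push_cast at h1 h2 ⊢; split_ifs <;> omega)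
    have hc : (y + 1) + (d : Int) = y + ((d + 1 : Nat) : Int) := by push_cast; ring
    rwa [hc] at hres

theorem pv_cut1_sound {z x : Int} {iv iv' : Int × Int} (hiv : iv' ∈ pvCut1 z iv)
    (hx1 : iv'.1 ≤ x) (hx2 : x ≤ iv'.2) : iv.1 ≤ x ∧ x ≤ iv.2 ∧ x ≠ z := by
  unfold pvCut1 at hiv
  split_ifs at hiv with h1 h2 h3 <;>
    simp only [List.mem_append, List.mem_cons, List.mem_singleton, List.not_mem_nil, or_false,
      false_or] at hiv <;>
    first
      | (subst hiv; omega)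
      | (rcases hiv with rfl | rfl <;> omega)
      | omega

theorem pv_cut1_valid {z : Int} {iv iv' : Int × Int} (hv : iv.1 ≤ iv.2) (hiv : iv' ∈ pvCut1 z iv) :
    iv'.1 ≤ iv'.2 := by
  unfold pvCut1 at hiv
  split_ifs at hiv with h1 h2 h3 <;>
    simp only [List.mem_append, List.mem_cons, List.mem_singleton, List.not_mem_nil, or_false,
      false_or] at hiv <;>
    first
      | (subst hiv; omega)
      | (rcases hiv with rfl | rfl <;> omega)
      | omega

theorem pv_cutRow_sound (r : Int) :
    ∀ (l ivs : List (Int × Int)) (iv' : Int × Int) (x : Int),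
      iv' ∈ l.foldl (fun acc p => if p.2 = r then acc.flatMap (pvCut1 p.1) else acc) ivs →
      iv'.1 ≤ x → x ≤ iv'.2 →
      (∃ iv ∈ ivs, iv.1 ≤ x ∧ x ≤ iv.2) ∧ (∀ p ∈ l, p.2 = r → p.1 ≠ x) := by
  intro l
  induction l with
  | nil =>
    intro ivs iv' x hmem hx1 hx2
    exact ⟨⟨iv', hmem, hx1, hx2⟩, by simp⟩
  | cons p l' ih =>
    intro ivs iv' x hmem hx1 hx2
    rw [List.foldl_cons] at hmem
    by_cases hp : p.2 = r
    · rw [if_pos hp] at hmem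
      obtain ⟨⟨iv1, hiv1, hc1, hc2⟩, hrest⟩ := ih _ iv' x hmem hx1 hx2
      obtain ⟨iv0, hiv0, hcut⟩ := List.mem_flatMap.1 hiv1
      obtain ⟨hc1', hc2', hne⟩ := pv_cut1_sound hcut hc1 hc2
      refine ⟨⟨iv0, hiv0, hc1', hc2'⟩, ?_⟩
      intro q hq hqr
      rcases List.mem_cons.1 hq with rfl | hq
      · exact fun he => hne he.symm
      · exact hrest q hq hqr
    · rw [if_neg hp] at hmem
      obtain ⟨hcov, hrest⟩ := ih _ iv' x hmem hx1 hx2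
      refine ⟨hcov, ?_⟩
      intro q hq hqr
      rcases List.mem_cons.1 hq with rfl | hq
      · exact absurd hqr hp
      · exact hrest q hq hqr

theorem pv_cutRow_valid (r : Int) :
    ∀ (l ivs : List (Int × Int)), (∀ iv ∈ ivs, iv.1 ≤ iv.2) →
      ∀ iv' ∈ l.foldl (fun acc p => if p.2 = r then acc.flatMap (pvCut1 p.1) else acc) ivs,
        iv'.1 ≤ iv'.2 := by
  intro l
  induction l with
  | nil => intro ivs hv iv' hmem; exact hv iv' hmem
  | cons p l' ih =>
    intro ivs hv iv' hmem
    rw [List.foldl_cons] at hmem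
    by_cases hp : p.2 = r
    · rw [if_pos hp] at hmem
      refine ih _ ?_ iv' hmem
      intro iv1 hiv1
      obtain ⟨iv0, hiv0, hcut⟩ := List.mem_flatMap.1 hiv1
      exact pv_cut1_valid (hv iv0 hiv0) hcut
    · rw [if_neg hp] at hmem
      exact ih _ hv iv' hmem

theorem pv_memHS {l : List (Int × Int)} {p : Int × Int} :
    p ∈ Std.HashSet.ofList l ↔ p ∈ l := by
  rw [Std.HashSet.mem_ofList]
  simp

theorem pv_rows_sound (l : List (Int × Int)) :
    ∀ (rows : List Int) (y : Int) (ivs : List (Int × Int)),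
      rows.Pairwise (· < ·) → (∀ t ∈ rows, y < t) → 0 ≤ y →
      (∀ p ∈ l, 0 < p.2 → p.2 ≤ y ∨ p.2 ∈ rows) →
      (∀ iv ∈ ivs, iv.1 ≤ iv.2 ∧ ∀ x : Int, iv.1 ≤ x → x ≤ iv.2 → PvReach (Std.HashSet.ofList l) x y) →
      (rows.foldl (pvStepRow l) (y, ivs)).2.isEmpty = false →
      ∃ x y', PvReach (Std.HashSet.ofList l) x y' ∧ 0 ≤ y' ∧ (∀ p ∈ l, 0 < p.2 → p.2 ≤ y') := by
  intro rows
  induction rows with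
  | nil =>
    intro y ivs _ _ hy0 hrocks hok hne
    simp only [List.foldl_nil] at hne
    cases ivs with
    | nil => simp at hne
    | cons iv rest =>
      obtain ⟨hv, hreach⟩ := hok iv List.mem_cons_self
      refine ⟨iv.1, y, hreach iv.1 le_rfl hv, hy0, ?_⟩
      intro p hp hpos
      rcases hrocks p hp hpos with h | h
      · exact h
      · exact absurd h (by simp)
  | cons r rest ih =>
    intro y ivs hpw hgt hy0 hrocks hok hne
    rw [List.foldl_cons] at hne
    have hyr : y < r := hgt r List.mem_cons_self
    obtain ⟨hpw1, hpw2⟩ := List.pairwise_cons.1 hpw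
    refine ih r (pvStepRow l (y, ivs) r).2 hpw2 (fun t ht => hpw1 t ht) (by omega) ?_ ?_ ?_
    · intro p hp hpos
      rcases hrocks p hp hpos with h | h
      · exact Or.inl (by omega)
      · rcases List.mem_cons.1 h with rfl | h
        · exact Or.inl le_rfl
        · exact Or.inr h
    · -- the new intervals are valid and reach row r
      intro iv' hiv'
      have hd : (0:Int) ≤ r - y := by omega
      have hvmap : ∀ ivE ∈ ivs.map (fun iv => (iv.1 - (r - y), iv.2 + (r - y))), ivE.1 ≤ ivE.2 := by
        intro ivE hivE
        obtain ⟨iv0, hiv0, rfl⟩ := List.mem_map.1 hivE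
        have := (hok iv0 hiv0).1
        simp only []
        omega
      constructor
      · exact pv_cutRow_valid r l _ hvmap iv' hiv'
      · intro x hx1 hx2
        obtain ⟨⟨ivE, hivE, hcE1, hcE2⟩, hnorock⟩ := pv_cutRow_sound r l _ iv' x hiv' hx1 hx2
        obtain ⟨iv0, hiv0, rfl⟩ := List.mem_map.1 hivE
        obtain ⟨hv0, hreach0⟩ := hok iv0 hiv0
        simp only [] at hcE1 hcE2
        have hxfree : (x, r) ∉ Std.HashSet.ofList l := fun hmem => hnorock (x, r) (pv_memHS.1 hmem) rfl rfl
        set d : Int := r - y with hdd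
        have hd1 : 1 ≤ d := by omega
        set x0 : Int := min (max x (iv0.1 - d + 1)) (iv0.2 + d - 1) with hx0
        set xb : Int := min (max x0 iv0.1) iv0.2 with hxb
        have hvb : iv0.1 ≤ iv0.2 := hv0
        have hreachb : PvReach (Std.HashSet.ofList l) xb y := hreach0 xb (by omega) (by omega)
        have htn : ((d - 1).toNat : Int) = d - 1 := by omega
        have hnomid : ∀ t : Int, y < t → t ≤ y + ((d - 1).toNat : Int) → ∀ p ∈ Std.HashSet.ofList l, p.2 ≠ t := by
          intro t ht1 ht2 p hpS hpt
          have hp := pv_memHS.1 hpS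
          rw [htn] at ht2
          have hpos : 0 < p.2 := by omega
          rcases hrocks p hp hpos with h | h
          · omega
          · rcases List.mem_cons.1 h with he | h
            · omega
            · have := hpw1 p.2 h; omega
        have hreach1 : PvReach (Std.HashSet.ofList l) x0 (y + ((d - 1).toNat : Int)) :=
          pv_reach_expand (Std.HashSet.ofList l) (d - 1).toNat xb y x0 hreachb hnomid
            (by rw [htn]; omega) (by rw [htn]; omega)
        have hcast2 : y + ((d - 1).toNat : Int) + 1 = r := by omega
        have hrel : x = x0 - 1 ∨ x = x0 ∨ x = x0 + 1 := by omega
        have hstep := PvReach.step hreach1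
          (by rcases hrel with h | h | h <;> [exact Or.inl h; exact Or.inr (Or.inl h); exact Or.inr (Or.inr h)])
          (by rw [hcast2]; exact hxfree)
        rwa [hcast2] at hstep
    · exact hne

theorem pv_escapeCheck_escapes (l : List (Int × Int))
    (h : pvEscapeCheck l (pvMaxYA l false) = true) :
    pvEscapes (pvMaxYA l false) (Std.HashSet.ofList l) 500 0 = true := by
  cases hm : pvMaxYA l false with
  | none =>
    rw [pvEscapes]
    simp [pvGeY]
  | some m0 =>
    rw [hm] at h
    unfold pvEscapeCheck at h
    simp only [Bool.not_eq_true'] at h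
    -- rows facts
    have hperm := PySem.List.sorted_perm
      ((PySem.Set.ofList (l.map Prod.snd)).filter (fun t => decide (0 < t))) (fun t => t) false
    have hnodup : (pvRockRows l).Nodup := by
      unfold pvRockRows
      exact hperm.nodup_iff.2 ((PySem.Set.nodup_ofList _).filter _)
    have hple : (pvRockRows l).Pairwise (· ≤ ·) := by
      unfold pvRockRows
      exact PySem.List.sorted_pairwise _ _
    have hplt : (pvRockRows l).Pairwise (· < ·) := by
      refine (hple.and hnodup).imp ?_
      intro a b ⟨h1, h2⟩
      exact lt_of_le_of_ne h1 h2
    have hmemrows : ∀ t : Int, t ∈ pvRockRows l ↔ (t ∈ l.map Prod.snd ∧ 0 < t) := by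
      intro t
      unfold pvRockRows
      rw [PySem.List.mem_sorted, List.mem_filter, PySem.Set.mem_ofList]
      simp
    obtain ⟨x, y', hreach, hy0, hall⟩ := pv_rows_sound l (pvRockRows l) 0 [(500, 500)]
      hplt (fun t ht => ((hmemrows t).1 ht).2) le_rfl
      (fun p hp hpos => Or.inr ((hmemrows p.2).2 ⟨List.mem_map_of_mem hp, hpos⟩))
      (by
        intro iv hiv
        simp only [List.mem_singleton] at hiv
        subst hiv
        refine ⟨le_rfl, ?_⟩
        intro x h1 h2
        have : x = 500 := by omega
        subst this
        exact PvReach.src)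
      h
    -- plunge to the abyss row
    set dN : Nat := (m0 - y').toNat with hdN
    have hfin : PvReach (Std.HashSet.ofList l) x (y' + (dN : Int)) := by
      refine pv_reach_expand (Std.HashSet.ofList l) dN x y' x hreach ?_ (by omega) (by omega)
      intro t ht1 ht2 p hpS hpt
      have hp := pv_memHS.1 hpS
      have hpos : 0 < p.2 := by omega
      have := hall p hp hpos
      omega
    have hge : pvGeY (some m0) (y' + (dN : Int)) = true := by
      simp only [pvGeY, decide_eq_true_eq]
      omega
    exact pv_escapes_up (some m0) (Std.HashSet.ofList l) x (y' + (dN : Int)) hfin (by rw [pvEscapes, dif_pos hge])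

-- ===== the main simulation lemma =====

theorem pv_main (part_2 : Bool) (m : Option Int) :
    ∀ (f : Nat) (occ : Std.HashSet (Int × Int)) (sand : Int) (path : List (Int × Int)),
      (path ≠ [] → PvChain m occ path ∧ (part_2 = true → ∀ q ∈ path.tail, q ∉ occ)) →
      (path = [] → part_2 = true ∧ (500, 0) ∈ occ) →
      (part_2 = false → pvEscapes m occ 500 0 = true) →
      pvLoopA part_2 m f occ sand = pvLoopB part_2 m f occ sand path := by
  intro f
  induction f with
  | zero =>
    intro occ sand path _ _ _
    cases path <;> rfl
  | succ f ih =>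
    intro occ sand path h1 h2 h3
    cases path with
    | nil =>
      obtain ⟨hp2, hmem⟩ := h2 rfl
      have hfall : pvFallA part_2 m occ 500 0 = .ret := by
        rw [pvFallA, if_pos ⟨hp2, hmem⟩]
      show pvLoopA part_2 m (f + 1) occ sand = sand
      simp only [pvLoopA, hfall]
    | cons top rest =>
      obtain ⟨x, y⟩ := top
      obtain ⟨hch, hfree⟩ := h1 (by simp)
      have hfree' : part_2 = true → ∀ q ∈ rest, q ∉ occ := by simpa using hfree
      have hw : pvFallA part_2 m occ 500 0 = pvFallA part_2 m occ x y :=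
        pv_walk part_2 m occ rest (x, y) hch hfree'
      by_cases htop : part_2 = true ∧ (x, y) ∈ occ
      · have hfall : pvFallA part_2 m occ x y = .ret := by rw [pvFallA, if_pos htop]
        have ha : pvLoopA part_2 m (f + 1) occ sand = sand := by
          simp only [pvLoopA, hw, hfall]
        have hb : pvLoopB part_2 m (f + 1) occ sand ((x, y) :: rest) = sand := by
          simp only [pvLoopB]
          rw [if_pos htop]
        rw [ha, hb]
      · have htopfree : part_2 = true → (x, y) ∉ occ := fun hp hm => htop ⟨hp, hm⟩
        have hgf := pv_glide_fall part_2 m occ x y ((x, y) :: rest) htopfree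
        set g := pvGlideB m occ x y ((x, y) :: rest) with hgdef
        have hhead := pv_glide_head m occ x y ((x, y) :: rest) (by simp)
        have hchg : PvChain m occ g.2 := pv_glide_chain m occ x y ((x, y) :: rest) (by simp) hch
        have hchg' : PvChain m occ (g.1 :: g.2.tail) := by rw [← hhead]; exact hchg
        have hlt : ∀ q ∈ g.2.tail, q.2 < g.1.2 := pv_chain_lt m occ g.2.tail g.1 hchg'
        have hinv1 : g.2.tail ≠ [] → PvChain m (occ.insert g.1) g.2.tail ∧
            (part_2 = true → ∀ q ∈ g.2.tail.tail, q ∉ occ.insert g.1) := by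
          intro hne
          cases htl : g.2.tail with
          | nil => exact absurd htl hne
          | cons c' rest2 =>
            rw [htl] at hchg' hlt
            constructor
            · exact pv_chain_add m occ g.1 rest2 c' hchg'.2 (hlt c' List.mem_cons_self)
            · intro hp q hq
              have hq2 : q ∈ g.2.tail := by rw [htl]; exact List.mem_cons_of_mem _ hq
              have hqin : q ∈ g.2 := by rw [hhead]; exact List.mem_cons_of_mem _ hq2
              have hqfree : q ∉ occ := by
                refine pv_glide_free m occ x y ((x, y) :: rest) ?_ q hqin
                intro r hr
                rcases List.mem_cons.1 hr with rfl | hr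
                · exact htopfree hp
                · exact hfree' hp r hr
              rw [pv_mem_add_ne (by
                intro he
                have hql : q ∈ c' :: rest2 := by rw [← htl]; exact hq2
                have := hlt q hql
                rw [he] at this
                omega)]
              exact hqfree
        have hinv2top : g.2.tail = [] → g.1 = (500, 0) := by
          intro htl
          rw [htl] at hchg'
          exact hchg'
        by_cases hgeY : pvGeY m g.1.2 = true
        · -- the grain reaches the abyss / floor row
          have hfall2 : pvFallA part_2 m occ 500 0 = PvFallRes.abyss g.1.1 g.1.2 := by
            rw [hw, hgf, if_pos hgeY]
          have ha : pvLoopA part_2 m (f + 1) occ sand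
              = if part_2 = true then pvLoopA part_2 m f (occ.insert (g.1.1, g.1.2)) sand
                else sand := by
            simp only [pvLoopA, hfall2]
          have hb : pvLoopB part_2 m (f + 1) occ sand ((x, y) :: rest)
              = if part_2 = true then pvLoopB part_2 m f (occ.insert g.1) sand g.2.tail
                else sand := by
            simp only [pvLoopB]
            rw [if_neg htop]
            simp only [← hgdef, if_pos hgeY]
          rw [ha, hb, Prod.mk.eta]
          by_cases hp : part_2 = true
          · rw [if_pos hp, if_pos hp]
            refine ih _ _ _ hinv1 ?_ ?_
            · intro htl
              refine ⟨hp, ?_⟩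
              rw [← hinv2top htl]
              exact Std.HashSet.mem_insert_self
            · intro hf
              rw [hf] at hp
              exact Bool.noConfusion hp
          · rw [if_neg hp, if_neg hp]
        · -- the grain settles
          have hgeY' : pvGeY m g.1.2 = false := by simpa using hgeY
          have hblock := pv_glide_blocked m occ x y ((x, y) :: rest) hgeY'
          have hne : part_2 = false → g.2.tail ≠ [] := by
            intro hf htl
            have hsrc := hinv2top htl
            have hbad := pv_escapes_blocked m occ g.1.1 g.1.2 hgeY' hblock.1 hblock.2.1 hblock.2.2
            rw [hsrc] at hbad
            simp only [] at hbad
            rw [h3 hf] at hbad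
            exact Bool.noConfusion hbad
          have hinv2' : g.2.tail = [] → part_2 = true ∧ (500, 0) ∈ occ.insert g.1 := by
            intro htl
            have hp2 : part_2 = true := by
              cases hpc : part_2
              · exact absurd htl (hne hpc)
              · rfl
            refine ⟨hp2, ?_⟩
            rw [← hinv2top htl]
            exact Std.HashSet.mem_insert_self
          have hesc' : part_2 = false → pvEscapes m (occ.insert g.1) 500 0 = true := by
            intro hf
            exact pv_escapes_add m occ g.1 hgeY' hblock.1 hblock.2.1 hblock.2.2 500 0 (h3 hf)
          have hfall2 : pvFallA part_2 m occ 500 0 = PvFallRes.settle g.1.1 g.1.2 := by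
            rw [hw, hgf, if_neg hgeY]
          have ha : pvLoopA part_2 m (f + 1) occ sand
              = pvLoopA part_2 m f (occ.insert (g.1.1, g.1.2)) (sand + 1) := by
            simp only [pvLoopA, hfall2]
          have hb : pvLoopB part_2 m (f + 1) occ sand ((x, y) :: rest)
              = pvLoopB part_2 m f (occ.insert g.1) (sand + 1) g.2.tail := by
            simp only [pvLoopB]
            rw [if_neg htop]
            simp only [← hgdef, if_neg hgeY]
          rw [ha, hb, Prod.mk.eta]
          exact ih _ _ _ hinv1 hinv2' hesc'

-- ===== VERDICT (by name: the statement is the Claim_ definition above) =====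
theorem simulate_sand_fall_spec : Claim_equal_simulate_sand_fall := by
  intro rocks part_2 _ hpre
  unfold Spec_simulate_sand_fall
  simp only [simulate_sand_fall, simulate_sand_fall_alt]
  rw [← pv_maxY_eq]
  apply pv_main
  · intro _
    refine ⟨rfl, ?_⟩
    intro _ q hq
    cases hq
  · intro h
    cases h
  · intro hp
    rcases hpre with hp2 | hfront
    · rw [hp2] at hp; cases hp
    · rw [hp]
      exact pv_escapeCheck_escapes _ hfront
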